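-- pv_equiv track=rewrite | github.com/thupchnsky/2DDNA | utils/conversion.py | decide_level
-- ===== SOURCE A (Python) =====
-- def decide_level(dna_seq, pre_dict, suf_dict):
--     pre_len = len(pre_dict['0'])
--     suf_len = len(suf_dict['0'])
--     pre_seq = dna_seq[0:pre_len]
--     suf_seq = dna_seq[-suf_len:]
--     err_bits = []
--     for i in range(len(pre_dict)):
--         err_bits.append(str_cmp(pre_seq, pre_dict[str(i)]) + str_cmp(suf_seq, suf_dict[str(i)]))
--     return err_bits.index(min(err_bits))
--
-- def str_cmp(s1, s2):
--     count = 0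
--     for i in range(len(s1)):
--         if s1[i] != s2[i]:
--             count += 1
--     return count
-- ===== SOURCE B (Python) =====
-- def decide_level(dna_seq, pre_dict, suf_dict):
--     n = len(pre_dict)
--     pre_seq = dna_seq[0:len(pre_dict['0'])]
--     suf_seq = dna_seq[-len(suf_dict['0']):]
--     pre_words = [pre_dict[str(i)] for i in range(n)]
--     suf_words = [suf_dict[str(i)] for i in range(n)]
--     # position-major traversal: one counter per level, bumped column by column
--     counts = [0] * n
--     for pos, ch in enumerate(pre_seq):
--         counts = [c + (w[pos] != ch) for c, w in zip(counts, pre_words)]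
--     for pos, ch in enumerate(suf_seq):
--         counts = [c + (w[pos] != ch) for c, w in zip(counts, suf_words)]
--     # right-to-left champion scan: ties move the champion left, so the first minimum wins
--     best = n - 1
--     for i in reversed(range(n - 1)):
--         if counts[i] <= counts[best]:
--             best = i
--     return best
-- ===== Notes on version B (the rewrite author's own statement) =====
-- stated objective: alternative
-- what changed: B transposes the traversal: instead of computing each level's full Hamming cost row by row into err_bits and then running min+index, it keeps one counter per level and sweeps the prefix/suffix column by column (position-major), then finds the first argmin by a right-to-left champion scan with non-strict ties instead of index(min(...)).
import Mathlib
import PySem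

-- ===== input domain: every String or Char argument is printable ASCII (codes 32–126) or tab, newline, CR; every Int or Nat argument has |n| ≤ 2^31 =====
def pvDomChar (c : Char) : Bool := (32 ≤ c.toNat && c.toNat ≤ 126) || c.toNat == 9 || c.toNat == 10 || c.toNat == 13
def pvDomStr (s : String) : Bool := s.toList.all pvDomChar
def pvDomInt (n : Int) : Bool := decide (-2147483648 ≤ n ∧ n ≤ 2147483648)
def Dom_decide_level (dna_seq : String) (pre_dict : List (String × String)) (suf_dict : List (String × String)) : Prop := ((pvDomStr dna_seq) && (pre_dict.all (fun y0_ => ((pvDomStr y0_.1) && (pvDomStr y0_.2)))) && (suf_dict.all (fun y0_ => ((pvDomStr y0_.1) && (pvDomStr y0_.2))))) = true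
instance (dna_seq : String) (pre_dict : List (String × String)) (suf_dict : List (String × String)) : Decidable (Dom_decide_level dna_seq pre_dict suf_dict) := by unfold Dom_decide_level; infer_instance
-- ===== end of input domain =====

-- B transposes the traversal (position-major counters instead of per-level Hamming rows) and
-- replaces index(min(err_bits)) by a right-to-left champion scan (objective: alternative).

-- ===== PORT A =====
-- str_cmp: loop over range(len(s1)), counting positions where s1[i] != s2[i].
-- s1[i]/s2[i] ported with getD (indices are in range on every input admitted by Pre_).
def pvStrCmpA (s1 s2 : List Char) : Int :=
  (PySem.List.pyRange 0 (s1.length : Int)).foldl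
    (fun count i => if s1.getD i.toNat ' ' ≠ s2.getD i.toNat ' ' then count + 1 else count) 0

-- decide_level: builds err_bits by appending, then err_bits.index(min(err_bits)).
-- dict lookups ported with (Dict.get? …).getD "" (the lookup succeeds on every input in Pre_);
-- min([]) / .index miss raise in Python: those inputs are outside Pre_.
def decide_level (dna_seq : String) (pre_dict : List (String × String)) (suf_dict : List (String × String)) : Int :=
  match PySem.List.min?
      ((PySem.List.pyRange 0 (pre_dict.length : Int)).foldl
        (fun acc i => acc ++
          [pvStrCmpA (PySem.List.slice dna_seq.toList (some 0) (some (((PySem.Dict.get? ⟨pre_dict⟩ "0").getD "").toList.length : Int)))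
              ((PySem.Dict.get? (⟨pre_dict⟩ : PySem.Dict String String) (PySem.Int.toStr i)).getD "").toList
           + pvStrCmpA (PySem.List.slice dna_seq.toList (some (-(((PySem.Dict.get? ⟨suf_dict⟩ "0").getD "").toList.length : Int))) none)
              ((PySem.Dict.get? (⟨suf_dict⟩ : PySem.Dict String String) (PySem.Int.toStr i)).getD "").toList]) [])
      (fun x => x) with
  | none => 0
  | some m =>
    match PySem.List.index?
        ((PySem.List.pyRange 0 (pre_dict.length : Int)).foldl
          (fun acc i => acc ++
            [pvStrCmpA (PySem.List.slice dna_seq.toList (some 0) (some (((PySem.Dict.get? ⟨pre_dict⟩ "0").getD "").toList.length : Int)))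
                ((PySem.Dict.get? (⟨pre_dict⟩ : PySem.Dict String String) (PySem.Int.toStr i)).getD "").toList
             + pvStrCmpA (PySem.List.slice dna_seq.toList (some (-(((PySem.Dict.get? ⟨suf_dict⟩ "0").getD "").toList.length : Int))) none)
                ((PySem.Dict.get? (⟨suf_dict⟩ : PySem.Dict String String) (PySem.Int.toStr i)).getD "").toList]) []) m with
    | some k => (k : Int)
    | none => 0

-- ===== PORT B =====
-- one column pass: 'for pos, ch in enumerate(seq): counts = [c + (w[pos] != ch) for c, w in zip(counts, ws)]'
-- w[pos] ported with getD (pos is in range on every input admitted by Pre_).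
def pvColPass (seq : List Char) (ws : List String) (counts : List Int) : List Int :=
  (PySem.List.enumerate seq).foldl
    (fun counts pc =>
      (counts.zip ws).map (fun cw => cw.1 + (if cw.2.toList.getD pc.1.toNat ' ' ≠ pc.2 then 1 else 0)))
    counts

-- position-major counters, then a right-to-left champion scan ('for i in reversed(range(n-1))').
-- best is a Nat here: it equals Python's best on every input in Pre_ (where n ≥ 1).
def decide_level_alt (dna_seq : String) (pre_dict : List (String × String)) (suf_dict : List (String × String)) : Int :=
  let n := pre_dict.length
  let pre_seq := PySem.List.slice dna_seq.toList (some 0) (some (((PySem.Dict.get? (⟨pre_dict⟩ : PySem.Dict String String) "0").getD "").toList.length : Int))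
  let suf_seq := PySem.List.slice dna_seq.toList (some (-(((PySem.Dict.get? (⟨suf_dict⟩ : PySem.Dict String String) "0").getD "").toList.length : Int))) none
  let pre_words := (PySem.List.pyRange 0 (n : Int)).map
      (fun i => (PySem.Dict.get? (⟨pre_dict⟩ : PySem.Dict String String) (PySem.Int.toStr i)).getD "")
  let suf_words := (PySem.List.pyRange 0 (n : Int)).map
      (fun i => (PySem.Dict.get? (⟨suf_dict⟩ : PySem.Dict String String) (PySem.Int.toStr i)).getD "")
  let counts := pvColPass suf_seq suf_words (pvColPass pre_seq pre_words (List.replicate n 0))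
  let best := ((List.range (n - 1)).reverse).foldl
      (fun best i => if counts.getD i 0 ≤ counts.getD best 0 then i else best) (n - 1)
  (best : Int)

-- ===== PRECONDITION & SPEC =====
-- Pre_ excludes exactly the inputs where A raises: a missing key '0' or str(i) (KeyError), a
-- codeword shorter than the compared slice, incl. the empty-suffix-codeword case (IndexError),
-- and an empty pre_dict (KeyError/ValueError).
def Pre_decide_level (dna_seq : String) (pre_dict : List (String × String)) (suf_dict : List (String × String)) : Prop :=
  pre_dict ≠ [] ∧
  ∀ i ∈ List.range pre_dict.length,
    (PySem.Dict.get? (⟨pre_dict⟩ : PySem.Dict String String) (PySem.Int.toStr (i : Int))).isSome = true ∧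
    (PySem.Dict.get? (⟨suf_dict⟩ : PySem.Dict String String) (PySem.Int.toStr (i : Int))).isSome = true ∧
    (PySem.List.slice dna_seq.toList (some 0) (some (((PySem.Dict.get? ⟨pre_dict⟩ "0").getD "").toList.length : Int))).length
      ≤ ((PySem.Dict.get? (⟨pre_dict⟩ : PySem.Dict String String) (PySem.Int.toStr (i : Int))).getD "").toList.length ∧
    (PySem.List.slice dna_seq.toList (some (-(((PySem.Dict.get? ⟨suf_dict⟩ "0").getD "").toList.length : Int))) none).length
      ≤ ((PySem.Dict.get? (⟨suf_dict⟩ : PySem.Dict String String) (PySem.Int.toStr (i : Int))).getD "").toList.length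
instance (dna_seq : String) (pre_dict : List (String × String)) (suf_dict : List (String × String)) : Decidable (Pre_decide_level dna_seq pre_dict suf_dict) := by unfold Pre_decide_level; infer_instance

def pvWitness_decide_level : String × (List (String × String)) × (List (String × String)) :=
  ("ACGT", [("0", "AC"), ("1", "GG")], [("0", "GA"), ("1", "GT")])

def Spec_decide_level (dna_seq : String) (pre_dict : List (String × String)) (suf_dict : List (String × String)) (out : Int) : Prop := out = decide_level_alt dna_seq pre_dict suf_dict
instance (dna_seq : String) (pre_dict : List (String × String)) (suf_dict : List (String × String)) (out : Int) : Decidable (Spec_decide_level dna_seq pre_dict suf_dict out) := by unfold Spec_decide_level; infer_instance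

-- ===== CLAIM (what is proved, stated in full; the proofs are below) =====
def Claim_equal_decide_level : Prop := ∀ (dna_seq : String) (pre_dict : List (String × String)) (suf_dict : List (String × String)), Dom_decide_level dna_seq pre_dict suf_dict → Pre_decide_level dna_seq pre_dict suf_dict → Spec_decide_level dna_seq pre_dict suf_dict (decide_level dna_seq pre_dict suf_dict)

-- ===== LEMMAS AND PROOFS =====

-- "first argmin of l among indices [m, l.length)" — the champion-scan invariant
def pvFA (l : List Int) (m b : Nat) : Prop :=
  m ≤ b ∧ b < l.length ∧
  (∀ j, m ≤ j → j < l.length → l.getD b 0 ≤ l.getD j 0) ∧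
  (∀ j, m ≤ j → j < b → l.getD b 0 < l.getD j 0)

lemma pvFA_unique (l : List Int) (k k' : Nat) (h : pvFA l 0 k) (h' : pvFA l 0 k') : k = k' := by
  obtain ⟨-, hk, hle, hlt⟩ := h
  obtain ⟨-, hk', hle', hlt'⟩ := h'
  rcases Nat.lt_trichotomy k k' with hc | hc | hc
  · have h1 := hlt' k (Nat.zero_le _) hc
    have h2 := hle k (Nat.zero_le _) hk
    have h3 := hle k' (Nat.zero_le _) hk'
    omega
  · exact hc
  · have h1 := hlt k' (Nat.zero_le _) hc
    have h3 := hle' k (Nat.zero_le _) hk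
    omega

-- the champion scan computes the first argmin
lemma pvScan_FA (l : List Int) : ∀ (m b : Nat), pvFA l m b →
    pvFA l 0 ((List.range m).foldr
      (fun i best => if l.getD i 0 ≤ l.getD best 0 then i else best) b) := by
  intro m
  induction m with
  | zero => intro b hb; simpa using hb
  | succ m ih =>
    intro b hb
    obtain ⟨hmb, hblen, hle, hlt⟩ := hb
    rw [List.range_succ, List.foldr_append]
    simp only [List.foldr_cons, List.foldr_nil]
    apply ih
    by_cases hc : l.getD m 0 ≤ l.getD b 0
    · rw [if_pos hc]
      refine ⟨le_refl m, by omega, ?_, fun j hj1 hj2 => absurd hj2 (by omega)⟩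
      intro j hj1 hj2
      rcases Nat.eq_or_lt_of_le hj1 with h | h
      · exact le_of_eq (by rw [h])
      · exact le_trans hc (hle j (by omega) hj2)
    · rw [if_neg hc]
      refine ⟨by omega, hblen, ?_, ?_⟩
      · intro j hj1 hj2
        rcases Nat.eq_or_lt_of_le hj1 with h | h
        · subst h; omega
        · exact hle j (by omega) hj2
      · intro j hj1 hj2
        rcases Nat.eq_or_lt_of_le hj1 with h | h
        · subst h; omega
        · exact hlt j (by omega) hj2

-- A's min + index produces an index satisfying the same first-argmin property
lemma pvA_FA (l : List Int) (m : Int) (k : Nat)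
    (hmin : PySem.List.min? l (fun x => x) = some m)
    (hidx : PySem.List.index? l m = some k) : pvFA l 0 k := by
  have hmem := PySem.List.min?_mem hmin
  have hisMin := PySem.List.min?_isMin hmin
  obtain ⟨hk, hkv, hbefore⟩ := PySem.List.getElem_of_index?_eq_some hidx
  refine ⟨Nat.zero_le _, hk, ?_, ?_⟩
  · intro j _ hj
    rw [List.getD_eq_getElem l 0 hk, List.getD_eq_getElem l 0 hj, hkv]
    exact hisMin _ (List.getElem_mem hj)
  · intro j _ hj
    have hjlen : j < l.length := lt_trans hj hk
    rw [List.getD_eq_getElem l 0 hk, List.getD_eq_getElem l 0 hjlen, hkv]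
    have hne := hbefore j hj
    have := hisMin _ (List.getElem_mem hjlen)
    rcases lt_or_eq_of_le this with h | h
    · exact h
    · exact absurd h.symm hne

-- zip again after a map over a zip
lemma pvZipMapZip {γ : Type} (f : Int × γ → Int) :
    ∀ (c : List Int) (w : List γ),
      ((c.zip w).map f).zip w = (c.zip w).map (fun cw => (f cw, cw.2)) := by
  intro c
  induction c with
  | nil => intro w; simp
  | cons a t ih =>
    intro w
    cases w with
    | nil => simp
    | cons b u => simp [ih u]

-- a fold of pointwise map-updates is a pointwise map of folds
lemma pvFoldMapZip (ws : List String) :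
    ∀ (L : List (Int × Char)) (counts : List Int), counts.length = ws.length →
      L.foldl (fun counts pc => (counts.zip ws).map
          (fun cw => cw.1 + (if cw.2.toList.getD pc.1.toNat ' ' ≠ pc.2 then 1 else 0))) counts
        = (counts.zip ws).map (fun cw => L.foldl
            (fun c pc => c + (if cw.2.toList.getD pc.1.toNat ' ' ≠ pc.2 then 1 else 0)) cw.1) := by
  intro L
  induction L with
  | nil =>
    intro counts hlen
    simp only [List.foldl_nil]
    exact (List.map_fst_zip (le_of_eq hlen)).symm
  | cons a L ih =>
    intro counts hlen
    rw [List.foldl_cons]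
    rw [ih _ (by simp [hlen])]
    rw [pvZipMapZip (fun cw => cw.1 + (if cw.2.toList.getD a.1.toNat ' ' ≠ a.2 then 1 else 0)) counts ws]
    rw [List.map_map]
    rfl

-- the per-level column accumulation is str_cmp (both count mismatching positions)
lemma pvInner (w : List Char) : ∀ (seq : List Char) (s c : Int),
    (PySem.List.enumerate seq s).foldl
        (fun c pc => c + (if w.getD pc.1.toNat ' ' ≠ pc.2 then 1 else 0)) c
      = c + ((List.range seq.length).countP
          (fun i => w.getD (s + ((i : Nat) : Int)).toNat ' ' != seq.getD i ' ') : Int) := by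
  intro seq
  induction seq with
  | nil => intro s c; simp [PySem.List.enumerate_nil]
  | cons a t ih =>
    intro s c
    rw [PySem.List.enumerate_cons, List.foldl_cons, ih (s + 1)]
    simp only [List.length_cons]
    rw [List.range_succ_eq_map, List.countP_cons, List.countP_map]
    have hcomp : ((fun i => w.getD (s + ((i : Nat) : Int)).toNat ' ' != (a :: t).getD i ' ') ∘ Nat.succ)
        = (fun i => w.getD (s + 1 + ((i : Nat) : Int)).toNat ' ' != t.getD i ' ') := by
      funext i
      simp only [Function.comp_apply]
      rw [show s + ((Nat.succ i : Nat) : Int) = s + 1 + ((i : Nat) : Int) from by push_cast; ring]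
      simp
    rw [hcomp]
    have h0 : (s + ((0 : Nat) : Int)).toNat = s.toNat := by simp
    by_cases hc : w.getD s.toNat ' ' ≠ a
    · have hb : (w.getD (s + ((0 : Nat) : Int)).toNat ' ' != (a :: t).getD 0 ' ') = true := by
        rw [h0]; simpa using hc
      rw [if_pos hc, hb]
      simp only [if_true]
      push_cast; omega
    · have hb : (w.getD (s + ((0 : Nat) : Int)).toNat ' ' != (a :: t).getD 0 ' ') = false := by
        rw [h0]; simpa using hc
      rw [if_neg hc, hb]
      simp only [Bool.false_eq_true, if_false]
      push_cast; omega

-- str_cmp as a countP over positions (matching pvInner's shape at s = 0)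
lemma pvStrCmpA_countP (s1 s2 : List Char) :
    pvStrCmpA s1 s2 = ((List.range s1.length).countP
      (fun i => s2.getD ((0 : Int) + ((i : Nat) : Int)).toNat ' ' != s1.getD i ' ') : Int) := by
  unfold pvStrCmpA
  rw [PySem.List.pyRange_zero_natCast, List.foldl_map]
  rw [PySem.List.foldl_ite_add_one (p := fun (i : Nat) => s1.getD ((i : Int)).toNat ' ' ≠ s2.getD ((i : Int)).toNat ' ')]
  rw [Int.zero_add]
  congr 1
  refine List.countP_congr ?_
  intro i _
  simp only [Int.toNat_natCast, decide_eq_true_eq, zero_add, bne_iff_ne]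
  exact ⟨fun h => Ne.symm h, fun h => Ne.symm h⟩

-- one column pass equals adding the row-wise str_cmp per level
lemma pvColPass_eq (seq : List Char) (ws : List String) (counts : List Int)
    (hlen : counts.length = ws.length) :
    pvColPass seq ws counts
      = (counts.zip ws).map (fun cw => cw.1 + pvStrCmpA seq cw.2.toList) := by
  unfold pvColPass
  rw [pvFoldMapZip ws _ counts hlen]
  apply List.map_congr_left
  intro cw _
  rw [pvInner cw.2.toList seq 0 cw.1, pvStrCmpA_countP seq cw.2.toList]

theorem decide_level_spec : Claim_equal_decide_level := by
  intro dna_seq pre_dict suf_dict _hdom hpre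
  obtain ⟨hne, _hall⟩ := hpre
  unfold Spec_decide_level decide_level decide_level_alt
  dsimp only
  set n := pre_dict.length with hn
  set preSeq := PySem.List.slice dna_seq.toList (some 0) (some (((PySem.Dict.get? (⟨pre_dict⟩ : PySem.Dict String String) "0").getD "").toList.length : Int)) with hpreSeq
  set sufSeq := PySem.List.slice dna_seq.toList (some (-(((PySem.Dict.get? (⟨suf_dict⟩ : PySem.Dict String String) "0").getD "").toList.length : Int))) none with hsufSeq
  set pw : Int → String := fun i => (PySem.Dict.get? (⟨pre_dict⟩ : PySem.Dict String String) (PySem.Int.toStr i)).getD "" with hpw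
  set sw : Int → String := fun i => (PySem.Dict.get? (⟨suf_dict⟩ : PySem.Dict String String) (PySem.Int.toStr i)).getD "" with hsw
  set gA : Int → Int := fun i => pvStrCmpA preSeq (pw i).toList + pvStrCmpA sufSeq (sw i).toList with hgA
  -- A's err_bits is a map
  have herr : (PySem.List.pyRange 0 (n : Int)).foldl
      (fun acc i => acc ++ [pvStrCmpA preSeq (pw i).toList + pvStrCmpA sufSeq (sw i).toList]) []
      = (PySem.List.pyRange 0 (n : Int)).map gA := by
    rw [PySem.List.foldl_append_singleton_eq_map]; rfl
  -- B's counts is the same map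
  have hcounts : pvColPass sufSeq ((PySem.List.pyRange 0 (n : Int)).map sw)
      (pvColPass preSeq ((PySem.List.pyRange 0 (n : Int)).map pw) (List.replicate n 0))
      = (PySem.List.pyRange 0 (n : Int)).map gA := by
    rw [pvColPass_eq preSeq _ _ (by rw [PySem.List.pyRange_zero_natCast]; simp)]
    rw [pvColPass_eq sufSeq _ _ (by rw [PySem.List.pyRange_zero_natCast]; simp)]
    rw [PySem.List.pyRange_zero_natCast]
    apply List.ext_getElem
    · simp
    · intro j h1 h2
      simp only [List.getElem_map, List.getElem_zip, List.getElem_replicate, hgA]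
      ring
  set l := (PySem.List.pyRange 0 (n : Int)).map gA with hl
  have hlen : l.length = n := by
    rw [hl, PySem.List.pyRange_zero_natCast]; simp
  have hn1 : 1 ≤ n := List.length_pos_of_ne_nil hne
  have hlnil : l ≠ [] := by
    intro h; rw [h] at hlen; simp at hlen; omega
  rw [herr, hcounts]
  cases hminE : PySem.List.min? l (fun x => x) with
  | none => exact absurd ((PySem.List.min?_eq_none_iff l (fun x => x)).mp hminE) hlnil
  | some m =>
    dsimp only
    have hmem : m ∈ l := PySem.List.min?_mem hminE
    have hidxS : (PySem.List.index? l m).isSome = true :=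
      (PySem.List.index?_isSome_iff l m).mpr hmem
    obtain ⟨k, hidx⟩ := Option.isSome_iff_exists.mp hidxS
    rw [hidx]
    dsimp only
    have hA : pvFA l 0 k := pvA_FA l m k hminE hidx
    have hbase : pvFA l (n - 1) (n - 1) := by
      refine ⟨le_refl _, by omega, ?_, by omega⟩
      intro j hj1 hj2
      rw [hlen] at hj2
      have : j = n - 1 := by omega
      rw [this]
    have hB := pvScan_FA l (n - 1) (n - 1) hbase
    rw [List.foldl_reverse]
    have := pvFA_unique l k _ hA hB
    rw [this]
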